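-- pv_equiv track=rewrite | github.com/aidanstansfield/math4202project | mipBP.py | genNeighbours
-- ===== SOURCE A (Python) =====
-- def genNeighbours(edges):
--     M = range(len(edges))
--     neighbours = {}
--     for m1 in M:
--         neighbours[edges[m1]] = []
--         for m2 in M:
--             #if edges share a node
--             if edges[m1][0] == edges[m2][0] or edges[m1][0] == edges[m2][1] or\
--             edges[m1][1] == edges[m2][0] or edges[m1][1] == edges[m2][1]:
--                 neighbours[edges[m1]].append(edges[m2])
--     return neighbours
-- ===== SOURCE B (Python) =====
-- def genNeighbours(edges):
--     # Index edges by endpoint, then merge the two (sorted) index lists per edge.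
--     inc = {}  # node -> strictly increasing list of indices of edges touching it
--     for i, (u, v) in enumerate(edges):
--         inc.setdefault(u, []).append(i)
--         if v != u:
--             inc.setdefault(v, []).append(i)
--     neighbours = {}
--     for (u, v) in edges:
--         if (u, v) in neighbours:
--             continue
--         a = inc[u]
--         b = inc[v]
--         # merge two strictly increasing lists, dropping duplicates across them
--         idxs = []
--         ia = 0
--         ib = 0
--         while ia < len(a) and ib < len(b):
--             x = a[ia]
--             y = b[ib]
--             if x < y:
--                 idxs.append(x)
--                 ia += 1
--             elif y < x:
--                 idxs.append(y)
--                 ib += 1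
--             else:
--                 idxs.append(x)
--                 ia += 1
--                 ib += 1
--         idxs.extend(a[ia:])
--         idxs.extend(b[ib:])
--         neighbours[(u, v)] = [edges[i] for i in idxs]
--     return neighbours
-- ===== Notes on version B (the rewrite author's own statement) =====
-- stated objective: faster
-- what changed: Replaces the all-pairs double scan with a node-to-edge-index inverted index built in one pass; each edge's neighbour list is produced by merging its two endpoints' sorted index lists, so the inner scan over all edges disappears.
import Mathlib
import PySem

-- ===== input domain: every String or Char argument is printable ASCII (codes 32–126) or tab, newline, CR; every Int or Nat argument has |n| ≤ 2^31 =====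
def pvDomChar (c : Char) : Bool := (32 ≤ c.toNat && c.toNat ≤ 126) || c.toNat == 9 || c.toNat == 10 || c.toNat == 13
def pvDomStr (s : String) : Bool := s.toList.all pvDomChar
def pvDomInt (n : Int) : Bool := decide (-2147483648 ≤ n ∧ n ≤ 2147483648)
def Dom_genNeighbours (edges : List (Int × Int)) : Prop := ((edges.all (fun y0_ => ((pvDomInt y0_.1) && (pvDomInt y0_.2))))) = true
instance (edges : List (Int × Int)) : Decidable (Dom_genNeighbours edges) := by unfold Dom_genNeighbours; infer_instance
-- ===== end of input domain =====

-- B replaces A's all-pairs double scan by a node→edge-index inverted index built in one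
-- pass, merging the two endpoints' sorted index lists per edge (equal return values).

-- ===== PORT A =====
-- Python A: for each m1, neighbours[edges[m1]] = [] and the inner loop appends to the
-- list held in the dict; the value at that key after the inner loop is the list the
-- inner loop builds, so the port inserts that list.
def genNeighbours (edges : List (Int × Int)) : List (Int × Int × List (Int × Int)) :=
  (List.foldl (fun d m1 =>
      d.insert (PySem.List.pyGetD edges m1 (0, 0))
        (List.foldl (fun lst m2 =>
            if (PySem.List.pyGetD edges m1 (0, 0)).1 == (PySem.List.pyGetD edges m2 (0, 0)).1
                || (PySem.List.pyGetD edges m1 (0, 0)).1 == (PySem.List.pyGetD edges m2 (0, 0)).2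
                || (PySem.List.pyGetD edges m1 (0, 0)).2 == (PySem.List.pyGetD edges m2 (0, 0)).1
                || (PySem.List.pyGetD edges m1 (0, 0)).2 == (PySem.List.pyGetD edges m2 (0, 0)).2 then
              lst ++ [PySem.List.pyGetD edges m2 (0, 0)]
            else lst)
          [] (PySem.List.pyRange 0 (PySem.List.len edges) 1)))
    (PySem.Dict.empty : PySem.Dict (Int × Int) (List (Int × Int))) (PySem.List.pyRange 0 (PySem.List.len edges) 1)).items.map (fun p => (p.1.1, p.1.2, p.2))

-- ===== PORT B =====
-- first loop of Source B: inc[u].append(i), and inc[v].append(i) when v != u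
def gnInc (edges : List (Int × Int)) : PySem.Dict Int (List Int) :=
  (PySem.List.enumerate edges 0).foldl (fun d p =>
      if p.2.2 ≠ p.2.1 then
        (d.modify p.2.1 [] (· ++ [p.1])).modify p.2.2 [] (· ++ [p.1])
      else d.modify p.2.1 [] (· ++ [p.1]))
    PySem.Dict.empty

-- Source B's while loop: merge two strictly increasing index lists, dropping cross duplicates
def mergeIdx : List Int → List Int → List Int
  | [], b => b
  | a, [] => a
  | x :: a, y :: b =>
      if x < y then x :: mergeIdx a (y :: b)
      else if y < x then y :: mergeIdx (x :: a) b
      else x :: mergeIdx a b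
  termination_by a b => a.length + b.length

def genNeighbours_alt (edges : List (Int × Int)) : List (Int × Int × List (Int × Int)) :=
  let inc := gnInc edges
  (edges.foldl (fun d e =>
      if d.contains e then d
      else d.insert e
        ((mergeIdx (inc.getD e.1 []) (inc.getD e.2 [])).map
          (fun i => PySem.List.pyGetD edges i (0, 0))))
    (PySem.Dict.empty : PySem.Dict (Int × Int) (List (Int × Int)))).items.map (fun p => (p.1.1, p.1.2, p.2))

-- ===== PRECONDITION & SPEC =====
def Spec_genNeighbours (edges : List (Int × Int)) (out : List (Int × Int × List (Int × Int))) : Prop := out = genNeighbours_alt edges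
instance (edges : List (Int × Int)) (out : List (Int × Int × List (Int × Int))) : Decidable (Spec_genNeighbours edges out) := by unfold Spec_genNeighbours; infer_instance

-- ===== CLAIM (what is proved, stated in full; the proofs are below) =====
def Claim_equal_genNeighbours : Prop := ∀ (edges : List (Int × Int)), Dom_genNeighbours edges → Spec_genNeighbours edges (genNeighbours edges)

-- ===== LEMMAS AND PROOFS =====

-- A's sharing condition, and "edge f touches node x"
def condb (e f : Int × Int) : Bool := e.1 == f.1 || e.1 == f.2 || e.2 == f.1 || e.2 == f.2
def touchb (x : Int) (f : Int × Int) : Bool := x == f.1 || x == f.2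

-- indices (from an enumeration) of the edges satisfying q
def Ix (edges : List (Int × Int)) (q : Int × Int → Bool) : List Int :=
  ((PySem.List.enumerate edges 0).filter (fun p => q p.2)).map (·.1)

lemma mem_mergeIdx (a b : List Int) (i : Int) : i ∈ mergeIdx a b ↔ i ∈ a ∨ i ∈ b := by
  induction a, b using mergeIdx.induct with
  | case1 b => simp [mergeIdx]
  | case2 a h => cases a <;> simp [mergeIdx]
  | case3 x a y b h1 ih => simp [mergeIdx, h1, ih]; tauto
  | case4 x a y b h1 h2 ih => simp [mergeIdx, h1, h2, ih]; tauto
  | case5 x a y b h1 h2 ih =>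
      have hxy : x = y := by omega
      subst hxy
      simp [mergeIdx, h1, h2, ih]; tauto

lemma pairwise_mergeIdx (a b : List Int) (ha : a.Pairwise (· < ·)) (hb : b.Pairwise (· < ·)) :
    (mergeIdx a b).Pairwise (· < ·) := by
  induction a, b using mergeIdx.induct with
  | case1 b => simpa [mergeIdx] using hb
  | case2 a h => cases a <;> simpa [mergeIdx] using ha
  | case3 x a y b h1 ih =>
      rw [List.pairwise_cons] at ha
      have hm : mergeIdx (x :: a) (y :: b) = x :: mergeIdx a (y :: b) := by
        simp [mergeIdx, h1]
      rw [hm, List.pairwise_cons]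
      refine ⟨?_, ih ha.2 hb⟩
      intro z hz
      rcases (mem_mergeIdx _ _ _).mp hz with hz | hz
      · exact ha.1 z hz
      · rcases List.mem_cons.mp hz with rfl | hz
        · exact h1
        · exact lt_trans h1 ((List.pairwise_cons.mp hb).1 z hz)
  | case4 x a y b h1 h2 ih =>
      rw [List.pairwise_cons] at hb
      have hm : mergeIdx (x :: a) (y :: b) = y :: mergeIdx (x :: a) b := by
        simp [mergeIdx, h1, h2]

      rw [hm, List.pairwise_cons]
      refine ⟨?_, ih ha hb.2⟩
      intro z hz
      rcases (mem_mergeIdx _ _ _).mp hz with hz | hz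
      · rcases List.mem_cons.mp hz with rfl | hz
        · exact h2
        · exact lt_trans h2 ((List.pairwise_cons.mp ha).1 z hz)
      · exact hb.1 z hz
  | case5 x a y b h1 h2 ih =>
      have hxy : x = y := by omega
      subst hxy
      rw [List.pairwise_cons] at ha hb
      have hm : mergeIdx (x :: a) (x :: b) = x :: mergeIdx a b := by
        simp [mergeIdx, h1, h2]
      rw [hm, List.pairwise_cons]
      refine ⟨?_, ih ha.2 hb.2⟩
      intro z hz
      rcases (mem_mergeIdx _ _ _).mp hz with hz | hz
      · exact ha.1 z hz
      · exact hb.1 z hz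

lemma eq_of_pairwise_lt (a : List Int) : ∀ (b : List Int), a.Pairwise (· < ·) →
    b.Pairwise (· < ·) → (∀ i, i ∈ a ↔ i ∈ b) → a = b := by
  induction a with
  | nil =>
      intro b _ _ h
      cases b with
      | nil => rfl
      | cons y b => exact absurd ((h y).mpr (List.mem_cons_self)) (List.not_mem_nil)
  | cons x a ih =>
      intro b ha hb h
      cases b with
      | nil => exact absurd ((h x).mp (List.mem_cons_self)) (List.not_mem_nil)
      | cons y b =>
          rw [List.pairwise_cons] at ha hb
          have hxy : x = y := by
            rcases List.mem_cons.mp ((h x).mp List.mem_cons_self) with h1 | h1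
            · exact h1
            · rcases List.mem_cons.mp ((h y).mpr List.mem_cons_self) with h2 | h2
              · exact h2.symm
              · have := ha.1 y h2
                have := hb.1 x h1
                omega
          subst hxy
          have : a = b := by
            refine ih b ha.2 hb.2 (fun i => ?_)
            constructor
            · intro hi
              rcases List.mem_cons.mp ((h i).mp (List.mem_cons_of_mem _ hi)) with rfl | h2
              · exact absurd (ha.1 i hi) (lt_irrefl i)
              · exact h2
            · intro hi
              rcases List.mem_cons.mp ((h i).mpr (List.mem_cons_of_mem _ hi)) with rfl | h2
              · exact absurd (hb.1 i hi) (lt_irrefl i)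
              · exact h2
          rw [this]

lemma pairwise_Ix (edges : List (Int × Int)) (q : Int × Int → Bool) :
    (Ix edges q).Pairwise (· < ·) := by
  have hs : (Ix edges q).Sublist ((PySem.List.enumerate edges 0).map (·.1)) :=
    List.Sublist.map _ List.filter_sublist
  rw [PySem.List.map_fst_enumerate] at hs
  exact List.Pairwise.sublist hs (PySem.List.pairwise_lt_pyRange_one 0 _)

lemma mem_Ix (edges : List (Int × Int)) (q : Int × Int → Bool) (i : Int) :
    i ∈ Ix edges q ↔ ∃ p ∈ PySem.List.enumerate edges 0, q p.2 ∧ p.1 = i := by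
  simp [Ix, List.mem_filter]

lemma mergeIdx_Ix (edges : List (Int × Int)) (q1 q2 : Int × Int → Bool) :
    mergeIdx (Ix edges q1) (Ix edges q2) = Ix edges (fun f => q1 f || q2 f) := by
  refine eq_of_pairwise_lt _ _
    (pairwise_mergeIdx _ _ (pairwise_Ix edges q1) (pairwise_Ix edges q2))
    (pairwise_Ix edges _) (fun i => ?_)
  rw [mem_mergeIdx, mem_Ix, mem_Ix, mem_Ix]
  constructor
  · rintro (⟨p, hp, hq, rfl⟩ | ⟨p, hp, hq, rfl⟩)
    · exact ⟨p, hp, by simp [hq], rfl⟩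
    · exact ⟨p, hp, by simp [hq], rfl⟩
  · rintro ⟨p, hp, hq, rfl⟩
    rcases Bool.or_eq_true_iff.mp hq with hq | hq
    · exact Or.inl ⟨p, hp, hq, rfl⟩
    · exact Or.inr ⟨p, hp, hq, rfl⟩

lemma gnInc_spec (l : List (Int × Int)) : ∀ (s : Int) (d : PySem.Dict Int (List Int)) (x : Int),
    ((PySem.List.enumerate l s).foldl (fun d p =>
        if p.2.2 ≠ p.2.1 then
          (d.modify p.2.1 [] (· ++ [p.1])).modify p.2.2 [] (· ++ [p.1])
        else d.modify p.2.1 [] (· ++ [p.1])) d).getD x []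
      = d.getD x [] ++ ((PySem.List.enumerate l s).filter (fun p => touchb x p.2)).map (·.1) := by
  induction l with
  | nil => intro s d x; simp [PySem.List.enumerate]
  | cons hd tl ih =>
      intro s d x
      rw [PySem.List.enumerate_cons, List.foldl_cons, ih (s + 1)]
      obtain ⟨u, v⟩ := hd
      by_cases hvu : v = u <;> by_cases hxu : x = u <;> by_cases hxv : x = v <;>
        simp_all [PySem.Dict.getD_modify, touchb]

lemma gnInc_getD (edges : List (Int × Int)) (x : Int) :
    (gnInc edges).getD x [] = Ix edges (touchb x) := by
  have h := gnInc_spec edges 0 PySem.Dict.empty x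
  rw [PySem.Dict.getD_empty] at h
  exact h.trans (by simp [Ix])

lemma Ix_map_getD (edges : List (Int × Int)) (q : Int × Int → Bool) :
    (Ix edges q).map (fun i => PySem.List.pyGetD edges i (0, 0)) = edges.filter q := by
  unfold Ix
  rw [List.map_map]
  have h1 : ∀ p ∈ (PySem.List.enumerate edges 0).filter (fun p => q p.2),
      ((fun i => PySem.List.pyGetD edges i (0, 0)) ∘ (·.1)) p = p.2 := by
    intro p hp
    have hp2 := List.mem_of_mem_filter hp
    rw [PySem.List.enumerate_eq_map_pyRange edges ((0 : Int), (0 : Int))] at hp2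
    rcases List.mem_map.mp hp2 with ⟨j, _, rfl⟩
    rfl
  rw [List.map_congr_left h1]
  conv_rhs => rw [← PySem.List.map_snd_enumerate edges 0]
  rw [List.filter_map]
  rfl

-- A-side dict fold: inserting a key-determined value
lemma items_foldl_insertF (F : (Int × Int) → List (Int × Int)) (l : List (Int × Int)) :
    ∀ (s : List (Int × Int)) (d : PySem.Dict (Int × Int) (List (Int × Int))),
    d.items = s.map (fun k => (k, F k)) →
    (l.foldl (fun d k => d.insert k (F k)) d).items
      = (PySem.Set.update s l).map (fun k => (k, F k)) := by
  induction l with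
  | nil => intro s d h; simpa [PySem.Set.update] using h
  | cons k l ih =>
      intro s d h
      have hkeys : d.keys = s := by
        simp [PySem.Dict.keys, h, List.map_map, Function.comp_def]
      rw [List.foldl_cons]
      have hupd : PySem.Set.update s (k :: l) = PySem.Set.update (PySem.Set.add s k) l := rfl
      rw [hupd]
      by_cases hk : k ∈ s
      · have hc : d.contains k = true :=
          (PySem.Dict.contains_iff_mem_keys d k).mpr (hkeys ▸ hk)
        have hitems : (d.insert k (F k)).items = s.map (fun k => (k, F k)) := by
          rw [PySem.Dict.items_insert_of_contains d (F k) hc, h, List.map_map]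
          apply List.map_congr_left
          intro a _
          by_cases hak : a = k
          · subst hak; simp
          · simp [hak]
        have hadd : PySem.Set.add s k = s := by
          simp [PySem.Set.add, hk]
        rw [hadd]
        exact ih s (d.insert k (F k)) hitems
      · have hc : d.contains k = false := by
          have : ¬ d.contains k = true := fun hc =>
            hk (hkeys ▸ (PySem.Dict.contains_iff_mem_keys d k).mp hc)
          exact eq_false_of_ne_true this
        have hitems : (d.insert k (F k)).items = (s ++ [k]).map (fun k => (k, F k)) := by
          rw [PySem.Dict.items_insert_of_not_contains d (F k) hc, h]
          simp
        have hadd : PySem.Set.add s k = s ++ [k] := by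
          simp [PySem.Set.add, hk]
        rw [hadd]
        exact ih (s ++ [k]) (d.insert k (F k)) hitems

-- B-side dict fold: skip seen keys, insert a key-determined value
lemma items_foldl_skipF (F : (Int × Int) → List (Int × Int)) (l : List (Int × Int)) :
    ∀ (s : List (Int × Int)) (d : PySem.Dict (Int × Int) (List (Int × Int))),
    d.items = s.map (fun k => (k, F k)) →
    (l.foldl (fun d k => if d.contains k then d else d.insert k (F k)) d).items
      = (PySem.Set.update s l).map (fun k => (k, F k)) := by
  induction l with
  | nil => intro s d h; simpa [PySem.Set.update] using h
  | cons k l ih =>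
      intro s d h
      have hkeys : d.keys = s := by
        simp [PySem.Dict.keys, h, List.map_map, Function.comp_def]
      rw [List.foldl_cons]
      have hupd : PySem.Set.update s (k :: l) = PySem.Set.update (PySem.Set.add s k) l := rfl
      rw [hupd]
      by_cases hk : k ∈ s
      · have hc : d.contains k = true :=
          (PySem.Dict.contains_iff_mem_keys d k).mpr (hkeys ▸ hk)
        have hadd : PySem.Set.add s k = s := by
          simp [PySem.Set.add, hk]
        rw [hc, if_pos rfl, hadd]
        exact ih s d h
      · have hc : d.contains k = false := by
          have : ¬ d.contains k = true := fun hc =>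
            hk (hkeys ▸ (PySem.Dict.contains_iff_mem_keys d k).mp hc)
          exact eq_false_of_ne_true this
        rw [hc]
        simp only [Bool.false_eq_true, if_false]
        have hitems : (d.insert k (F k)).items = (s ++ [k]).map (fun k => (k, F k)) := by
          rw [PySem.Dict.items_insert_of_not_contains d (F k) hc, h]
          simp
        have hadd : PySem.Set.add s k = s ++ [k] := by
          simp [PySem.Set.add, hk]
        rw [hadd]
        exact ih (s ++ [k]) (d.insert k (F k)) hitems

lemma A_inner (edges : List (Int × Int)) (e : Int × Int) :
    List.foldl (fun lst m2 =>
        if e.1 == (PySem.List.pyGetD edges m2 (0, 0)).1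
            || e.1 == (PySem.List.pyGetD edges m2 (0, 0)).2
            || e.2 == (PySem.List.pyGetD edges m2 (0, 0)).1
            || e.2 == (PySem.List.pyGetD edges m2 (0, 0)).2 then
          lst ++ [PySem.List.pyGetD edges m2 (0, 0)]
        else lst)
      [] (PySem.List.pyRange 0 (PySem.List.len edges) 1) = edges.filter (condb e) := by
  have h1 := PySem.List.foldl_pyRange_zero_pyGetD' edges ((0, 0) : Int × Int)
      (fun lst f => if condb e f then lst ++ [f] else lst) []
  have h2 := PySem.List.foldl_append_if (condb e) id edges []
  exact h1.trans (h2.trans (by simp))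

lemma A_eq (edges : List (Int × Int)) :
    genNeighbours edges
      = (PySem.Set.ofList edges).map (fun e => (e.1, e.2, edges.filter (condb e))) := by
  have h1 := PySem.List.foldl_pyRange_zero_pyGetD' edges ((0, 0) : Int × Int)
      (fun (d : PySem.Dict (Int × Int) (List (Int × Int))) (e : Int × Int) =>
        d.insert e (List.foldl (fun lst m2 =>
            if e.1 == (PySem.List.pyGetD edges m2 (0, 0)).1
                || e.1 == (PySem.List.pyGetD edges m2 (0, 0)).2
                || e.2 == (PySem.List.pyGetD edges m2 (0, 0)).1
                || e.2 == (PySem.List.pyGetD edges m2 (0, 0)).2 then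
              lst ++ [PySem.List.pyGetD edges m2 (0, 0)]
            else lst)
          [] (PySem.List.pyRange 0 (PySem.List.len edges) 1)))
      PySem.Dict.empty
  have hfun : (fun (d : PySem.Dict (Int × Int) (List (Int × Int))) (e : Int × Int) =>
        d.insert e (List.foldl (fun lst m2 =>
            if e.1 == (PySem.List.pyGetD edges m2 (0, 0)).1
                || e.1 == (PySem.List.pyGetD edges m2 (0, 0)).2
                || e.2 == (PySem.List.pyGetD edges m2 (0, 0)).1
                || e.2 == (PySem.List.pyGetD edges m2 (0, 0)).2 then
              lst ++ [PySem.List.pyGetD edges m2 (0, 0)]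
            else lst)
          [] (PySem.List.pyRange 0 (PySem.List.len edges) 1)))
      = (fun d e => d.insert e (edges.filter (condb e))) :=
    funext fun d => funext fun e => congrArg _ (A_inner edges e)
  rw [hfun] at h1
  have h2 := items_foldl_insertF (fun e => edges.filter (condb e)) edges [] PySem.Dict.empty rfl
  calc genNeighbours edges
      = ((edges.foldl (fun d e => d.insert e (edges.filter (condb e)))
          PySem.Dict.empty).items).map (fun p => (p.1.1, p.1.2, p.2)) :=
        congrArg (fun (t : PySem.Dict (Int × Int) (List (Int × Int))) =>
          t.items.map (fun (p : (Int × Int) × List (Int × Int)) => (p.1.1, p.1.2, p.2))) h1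
    _ = (PySem.Set.ofList edges).map (fun e => (e.1, e.2, edges.filter (condb e))) := by
        rw [h2, List.map_map]
        rfl

lemma G_eq_F (edges : List (Int × Int)) (e : Int × Int) :
    (mergeIdx ((gnInc edges).getD e.1 []) ((gnInc edges).getD e.2 [])).map
        (fun i => PySem.List.pyGetD edges i (0, 0)) = edges.filter (condb e) := by
  rw [gnInc_getD, gnInc_getD, mergeIdx_Ix, Ix_map_getD]
  apply List.filter_congr
  intro f _
  simp [touchb, condb, Bool.or_assoc]

lemma B_eq (edges : List (Int × Int)) :
    genNeighbours_alt edges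
      = (PySem.Set.ofList edges).map (fun e => (e.1, e.2, edges.filter (condb e))) := by
  have h2 := items_foldl_skipF
      (fun e => (mergeIdx ((gnInc edges).getD e.1 []) ((gnInc edges).getD e.2 [])).map
        (fun i => PySem.List.pyGetD edges i (0, 0)))
      edges [] PySem.Dict.empty rfl
  calc genNeighbours_alt edges
      = ((PySem.Set.update [] edges).map (fun e =>
          (e, (mergeIdx ((gnInc edges).getD e.1 []) ((gnInc edges).getD e.2 [])).map
            (fun i => PySem.List.pyGetD edges i (0, 0))))).map (fun p => (p.1.1, p.1.2, p.2)) :=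
        congrArg (fun (t : List ((Int × Int) × List (Int × Int))) =>
          t.map (fun (p : (Int × Int) × List (Int × Int)) => (p.1.1, p.1.2, p.2))) h2
    _ = (PySem.Set.ofList edges).map (fun e => (e.1, e.2, edges.filter (condb e))) := by
        rw [List.map_map]
        apply List.map_congr_left
        intro e _
        simp only [Function.comp]
        rw [G_eq_F edges e]

-- ===== VERDICT (by name: the statement is the Claim_ definition above) =====
theorem genNeighbours_spec : Claim_equal_genNeighbours := by
  intro edges _
  unfold Spec_genNeighbours
  rw [A_eq, B_eq]
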